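-- pv_equiv track=rewrite | github.com/NancyHebert/tssbe | data/models/reports_students.py | count_researchers
-- ===== SOURCE A (Python) =====
-- def count_researchers(researchers_contacted_list):
--     results = []
--     prev_student = ''
--     researchers_count = 0
--     first_time_through = True
--
--     researchers_contacted_list = sorted(
--         researchers_contacted_list,
--         key=lambda contact: contact["student_username"]
--         )
--     for contact in researchers_contacted_list:
--         if contact["student_username"] == prev_student:
--             researchers_count += 1
--         else:
--             if first_time_through:
--                 first_time_through = False
--             else:
--                 results.append(researchers_count)
--             prev_student = contact["student_username"]
--             researchers_count = 1
--
--     # After loop, save any remaining data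
--     if researchers_count > 0:
--         results.append(researchers_count)
--
--     return results
-- ===== SOURCE B (Python) =====
-- def count_researchers(researchers_contacted_list):
--     counts = {}
--     for contact in researchers_contacted_list:
--         username = contact["student_username"]
--         counts[username] = counts.get(username, 0) + 1
--     return [counts[username] for username in sorted(counts)]
-- ===== Notes on version B (the rewrite author's own statement) =====
-- stated objective: simpler
-- what changed: B replaces A's sort-the-whole-contact-list-then-detect-consecutive-runs state machine (prev_student/first_time_through/flush-after-loop) by a one-pass tally dict keyed on student_username followed by emitting the counts over the sorted keys.
-- intended difference: On inputs holding both a contact with empty username "" and one with a non-empty username, A silently drops the ""-group's count (its prev_student sentinel '' collides with the real username), e.g. returning [1] where B returns [1, 1]; B reports every group's count, which is the intended value. — e.g. on count_researchers([[("student_username", "")], [("student_username", "a")]]): A returns [1], B returns [1, 1]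
import Mathlib
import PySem

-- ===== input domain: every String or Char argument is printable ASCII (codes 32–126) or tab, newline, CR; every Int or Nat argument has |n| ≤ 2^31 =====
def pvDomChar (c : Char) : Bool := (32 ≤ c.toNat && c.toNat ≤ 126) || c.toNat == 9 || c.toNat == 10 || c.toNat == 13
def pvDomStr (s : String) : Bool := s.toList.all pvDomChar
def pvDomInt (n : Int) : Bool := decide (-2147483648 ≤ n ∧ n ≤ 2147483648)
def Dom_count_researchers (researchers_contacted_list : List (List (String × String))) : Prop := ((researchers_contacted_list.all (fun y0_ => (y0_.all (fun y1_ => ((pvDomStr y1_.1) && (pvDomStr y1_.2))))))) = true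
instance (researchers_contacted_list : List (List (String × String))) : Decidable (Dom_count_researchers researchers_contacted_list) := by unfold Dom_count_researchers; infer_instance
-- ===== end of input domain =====

-- B replaces A's sort-then-detect-consecutive-runs state machine by a single tally dict
-- followed by one emission pass over the sorted keys (objective: simpler; return value only).

-- ===== PORT A =====
-- contact["student_username"] (total form; Pre_ guarantees the key is present)
def pvUname (contact : List (String × String)) : String :=
  ((PySem.Dict.mk contact).get? "student_username").getD ""

def count_researchers (researchers_contacted_list : List (List (String × String))) : List Int :=
  -- results, prev_student, researchers_count, first_time_through
  let sortedContacts := PySem.List.sorted researchers_contacted_list (fun contact => pvUname contact) false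
  let st := sortedContacts.foldl
    (fun (st : List Int × String × Int × Bool) contact =>
      if pvUname contact == st.2.1 then
        (st.1, st.2.1, st.2.2.1 + 1, st.2.2.2)
      else
        ((if st.2.2.2 then st.1 else st.1 ++ [st.2.2.1]), pvUname contact, 1, false))
    ([], "", 0, true)
  if st.2.2.1 > 0 then st.1 ++ [st.2.2.1] else st.1

-- ===== PORT B =====
def count_researchers_alt (researchers_contacted_list : List (List (String × String))) : List Int :=
  let counts := researchers_contacted_list.foldl
    (fun d contact => d.insert (pvUname contact) (d.getD (pvUname contact) 0 + 1))
    PySem.Dict.empty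
  (PySem.List.sorted counts.keys (fun u => u) false).map (fun u => counts.getD u 0)

-- ===== PRECONDITION & SPEC =====
-- Pre_ excludes exactly the inputs where Python A raises KeyError: a contact without the
-- "student_username" key.
def Pre_count_researchers (researchers_contacted_list : List (List (String × String))) : Prop :=
  ∀ contact ∈ researchers_contacted_list, (PySem.Dict.mk contact).contains "student_username" = true
instance (researchers_contacted_list : List (List (String × String))) : Decidable (Pre_count_researchers researchers_contacted_list) := by unfold Pre_count_researchers; infer_instance
def pvWitness_count_researchers : (List (List (String × String))) := [[("student_username", "a")]]

-- On lists holding both a contact with empty username "" and one with a non-empty username,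
-- A silently drops the count of the ""-group (its prev_student sentinel '' collides with the
-- real username), while B returns every group's count; B's value is the intended one.
def D_count_researchers (researchers_contacted_list : List (List (String × String))) : Prop :=
  (∃ contact ∈ researchers_contacted_list, pvUname contact = "") ∧
  (∃ contact ∈ researchers_contacted_list, pvUname contact ≠ "")
instance (researchers_contacted_list : List (List (String × String))) : Decidable (D_count_researchers researchers_contacted_list) := by unfold D_count_researchers; infer_instance

def Spec_count_researchers (researchers_contacted_list : List (List (String × String))) (out : List Int) : Prop := ¬ D_count_researchers researchers_contacted_list → out = count_researchers_alt researchers_contacted_list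
instance (researchers_contacted_list : List (List (String × String))) (out : List Int) : Decidable (Spec_count_researchers researchers_contacted_list out) := by unfold Spec_count_researchers; infer_instance

def pvDiffWitness_count_researchers : (List (List (String × String))) :=
  [[("student_username", "")], [("student_username", "a")]]
def pvDiffWitnessOut_count_researchers : (List Int) × (List Int) := ([1], [1, 1])

-- ===== CLAIM (what is proved, stated in full; the proofs are below) =====
def Claim_unchanged_count_researchers : Prop := ∀ (researchers_contacted_list : List (List (String × String))), Dom_count_researchers researchers_contacted_list → Pre_count_researchers researchers_contacted_list → Spec_count_researchers researchers_contacted_list (count_researchers researchers_contacted_list)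
def Claim_changed_count_researchers : Prop := Dom_count_researchers (pvDiffWitness_count_researchers) ∧ Pre_count_researchers (pvDiffWitness_count_researchers) ∧ D_count_researchers (pvDiffWitness_count_researchers) ∧ count_researchers (pvDiffWitness_count_researchers) = pvDiffWitnessOut_count_researchers.1 ∧ count_researchers_alt (pvDiffWitness_count_researchers) = pvDiffWitnessOut_count_researchers.2 ∧ pvDiffWitnessOut_count_researchers.1 ≠ pvDiffWitnessOut_count_researchers.2
def Claim_exact_count_researchers : Prop := ∀ (researchers_contacted_list : List (List (String × String))), Dom_count_researchers researchers_contacted_list → Pre_count_researchers researchers_contacted_list → D_count_researchers researchers_contacted_list → count_researchers researchers_contacted_list ≠ count_researchers_alt researchers_contacted_list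

-- ===== LEMMAS AND PROOFS =====

-- A's loop body / final flush, as named functions over the username stream.
def pvStep (st : List Int × String × Int × Bool) (k : String) : List Int × String × Int × Bool :=
  if k == st.2.1 then (st.1, st.2.1, st.2.2.1 + 1, st.2.2.2)
  else ((if st.2.2.2 then st.1 else st.1 ++ [st.2.2.1]), k, 1, false)

def pvFin (st : List Int × String × Int × Bool) : List Int :=
  if st.2.2.1 > 0 then st.1 ++ [st.2.2.1] else st.1

-- the intended result on a key list: counts of the distinct keys in first-occurrence order
def pvSpec : List String → List Int
  | [] => []
  | k :: ks => ((1 : Int) + ks.count k) :: pvSpec (ks.filter (· ≠ k))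
termination_by t => t.length
decreasing_by
  simp only [List.length_unattach, List.length_cons]
  exact Nat.lt_succ_of_le (le_trans (List.length_filter_le _ _) (by simp))

theorem pvSpec_nil : pvSpec [] = [] := by rw [pvSpec.eq_def]

theorem pvSpec_cons (k : String) (ks : List String) :
    pvSpec (k :: ks) = ((1 : Int) + ks.count k) :: pvSpec (ks.filter (· ≠ k)) := by
  rw [pvSpec.eq_def]

theorem pvStep_self (res : List Int) (prev : String) (cnt : Int) (ftt : Bool) :
    pvStep (res, prev, cnt, ftt) prev = (res, prev, cnt + 1, ftt) := by
  simp [pvStep]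

theorem pvStep_ne_false (res : List Int) (prev : String) (cnt : Int) (k : String) (h : k ≠ prev) :
    pvStep (res, prev, cnt, false) k = (res ++ [cnt], k, 1, false) := by
  simp [pvStep, h]

theorem pvStep_ne_true (res : List Int) (prev : String) (cnt : Int) (k : String) (h : k ≠ prev) :
    pvStep (res, prev, cnt, true) k = (res, k, 1, false) := by
  simp [pvStep, h]

theorem pv_empty_le (s : String) : "" ≤ s := by
  by_contra h
  rw [not_le, String.lt_iff_toList_lt] at h
  simp at h

theorem pvA_eq_fold (l : List (List (String × String))) :
    count_researchers l =
      pvFin (((PySem.List.sorted l (fun c => pvUname c) false).map pvUname).foldl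
        pvStep ([], "", 0, true)) := by
  rw [List.foldl_map]
  rfl

theorem pv_run (ks : List String) : ∀ (prev : String) (cnt : Int) (res : List Int),
    0 < cnt → (∀ x ∈ ks, prev ≤ x) → ks.Pairwise (· ≤ ·) →
    pvFin (ks.foldl pvStep (res, prev, cnt, false)) =
      res ++ (cnt + ks.count prev) :: pvSpec (ks.filter (· ≠ prev)) := by
  induction ks with
  | nil =>
    intro prev cnt res hc _ _
    simp [pvFin, pvSpec_nil, hc]
  | cons k ks ih =>
    intro prev cnt res hc hall hp
    obtain ⟨hhead, htail⟩ := List.pairwise_cons.mp hp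
    by_cases hk : k = prev
    · subst hk
      rw [List.foldl_cons, pvStep_self,
        ih k (cnt + 1) res (by omega) hhead htail]
      have hfk : List.filter (· ≠ k) (k :: ks) = List.filter (· ≠ k) ks := by simp
      rw [hfk, List.count_cons_self]
      congr 2
      push_cast
      ring
    · have hlt : prev < k := lt_of_le_of_ne (hall k (by simp)) (Ne.symm hk)
      have hnot : prev ∉ k :: ks := by
        intro hmem
        rcases List.mem_cons.mp hmem with h | h
        · exact hk h.symm
        · exact absurd (hhead prev h) (not_le.mpr hlt)
      rw [List.foldl_cons, pvStep_ne_false res prev cnt k hk,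
        ih k 1 (res ++ [cnt]) (by omega) hhead htail,
        List.count_eq_zero.mpr hnot,
        show List.filter (fun x => decide (x ≠ prev)) (k :: ks) = k :: ks from
          List.filter_eq_self.mpr
            (fun x hx => by simp only [decide_eq_true_eq]; exact fun h => hnot (by rwa [h] at hx)),
        pvSpec_cons]
      simp

theorem pv_start (c : Int) (k : String) (rest : List String) (hk : k ≠ "")
    (hp : (k :: rest).Pairwise (· ≤ ·)) :
    pvFin (List.foldl pvStep ([], "", c, true) (k :: rest)) = pvSpec (k :: rest) := by
  obtain ⟨hhead, htail⟩ := List.pairwise_cons.mp hp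
  rw [List.foldl_cons, pvStep_ne_true [] "" c k hk,
    pv_run rest k 1 [] (by omega) hhead htail, pvSpec_cons]
  simp

theorem pv_replicate_fold (n : Nat) : ∀ (c : Int) (res : List Int),
    List.foldl pvStep (res, "", c, true) (List.replicate n "") = (res, "", c + n, true) := by
  induction n with
  | zero => intro c res; simp
  | succ m ih =>
    intro c res
    rw [List.replicate_succ, List.foldl_cons, pvStep_self, ih (c + 1) res]
    simp only [Prod.mk.injEq, true_and, and_true]
    push_cast
    ring

theorem pv_spec_replicate (n : Nat) (x : String) :
    pvSpec (List.replicate n x) = if n = 0 then [] else [(n : Int)] := by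
  cases n with
  | zero => simp [pvSpec_nil]
  | succ m =>
    rw [List.replicate_succ, pvSpec_cons, List.count_replicate]
    have hf : List.filter (· ≠ x) (List.replicate m x) = [] := by simp
    rw [hf, pvSpec_nil]
    simp
    ring

theorem pv_key_lemma : ∀ (n : Nat) (t : List String), t.length ≤ n → t.Pairwise (· ≤ ·) →
    pvSpec t = (PySem.List.sorted (PySem.Set.ofList t) (fun x => x) false).map
      (fun u => ((t.count u : Nat) : Int)) := by
  intro n
  induction n with
  | zero =>
    intro t ht _
    have : t = [] := List.eq_nil_of_length_eq_zero (Nat.le_zero.mp ht)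
    subst this
    rw [pvSpec_nil]
    rfl
  | succ n ih =>
    intro t ht hp
    cases t with
    | nil => rw [pvSpec_nil]; rfl
    | cons k r =>
      have hhead : ∀ x ∈ r, k ≤ x := (List.pairwise_cons.mp hp).1
      have htail : r.Pairwise (· ≤ ·) := (List.pairwise_cons.mp hp).2
      have hfp : (r.filter (· ≠ k)).Pairwise (· ≤ ·) := htail.sublist List.filter_sublist
      -- the sorted distinct keys of k :: r are k followed by those of r.filter (≠ k)
      have hsorted : PySem.List.sorted (PySem.Set.ofList (k :: r)) (fun x => x) false =
          k :: PySem.List.sorted (PySem.Set.ofList (r.filter (· ≠ k))) (fun x => x) false := by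
        apply PySem.List.sorted_id_eq_of_perm_of_pairwise
        · have h1 : (k :: PySem.List.sorted (PySem.Set.ofList (r.filter (· ≠ k))) (fun x => x) false).Perm
              (k :: PySem.Set.ofList (r.filter (· ≠ k))) :=
            List.Perm.cons k (PySem.List.sorted_perm _ _ _)
          refine h1.trans ?_
          rw [List.perm_ext_iff_of_nodup ?_ (PySem.Set.nodup_ofList _)]
          · intro a
            simp only [List.mem_cons, PySem.Set.mem_ofList, List.mem_filter,
              decide_eq_true_eq]
            by_cases ha : a = k <;> simp [ha]
          · refine List.nodup_cons.mpr ⟨?_, PySem.Set.nodup_ofList _⟩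
            intro hmem
            rw [PySem.Set.mem_ofList] at hmem
            have hmem2 := (List.mem_filter.mp hmem).2
            simp at hmem2
        · refine List.pairwise_cons.mpr ⟨?_, PySem.List.sorted_pairwise _ _⟩
          intro x hx
          have : x ∈ r := by
            have hx' := (PySem.List.sorted_perm (PySem.Set.ofList (r.filter (· ≠ k))) (fun x => x) false).mem_iff.mp hx
            rw [PySem.Set.mem_ofList] at hx'
            exact (List.mem_filter.mp hx').1
          exact hhead x this
      rw [pvSpec_cons, hsorted, List.map_cons]
      congr 1
      · rw [List.count_cons_self]
        push_cast
        ring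
      · rw [ih (r.filter (· ≠ k)) (le_trans (List.length_filter_le _ _) (by simpa using ht)) hfp]
        apply List.map_congr_left
        intro u hu
        have humem : u ∈ r.filter (· ≠ k) := by
          have hu' := (PySem.List.sorted_perm (PySem.Set.ofList (r.filter (· ≠ k))) (fun x => x) false).mem_iff.mp hu
          rwa [PySem.Set.mem_ofList] at hu'
        have hune : u ≠ k := by simpa using (List.mem_filter.mp humem).2
        have hcf : List.count u (List.filter (fun x => decide (x ≠ k)) r) = List.count u r := by
          rw [List.count_filter]
          simp [hune]
        rw [hcf, Nat.cast_inj, List.count_cons]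
        simp [Ne.symm hune]

-- B computes pvSpec of the sorted username list.
theorem pvB_eq_spec (l : List (List (String × String))) :
    count_researchers_alt l = pvSpec (PySem.List.sorted (l.map pvUname) (fun x => x) false) := by
  have hfold : l.foldl
      (fun d contact => d.insert (pvUname contact) (d.getD (pvUname contact) 0 + 1))
      PySem.Dict.empty = PySem.Dict.counter (l.map pvUname) := by
    rw [← PySem.Dict.foldl_insert_getD_add_one_eq_counter, List.foldl_map]
  show (PySem.List.sorted (PySem.Dict.keys _) (fun u => u) false).map _ = _
  rw [hfold, PySem.Dict.keys_counter]
  have hperm : (PySem.List.sorted (l.map pvUname) (fun x => x) false).Perm (l.map pvUname) :=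
    PySem.List.sorted_perm _ _ _
  have hsets : PySem.List.sorted (PySem.Set.ofList (PySem.List.sorted (l.map pvUname) (fun x => x) false)) (fun x => x) false =
      PySem.List.sorted (PySem.Set.ofList (l.map pvUname)) (fun x => x) false := by
    apply PySem.List.sorted_eq_sorted_of_perm _ _ _ (fun a b h => h)
    rw [List.perm_ext_iff_of_nodup (PySem.Set.nodup_ofList _) (PySem.Set.nodup_ofList _)]
    intro a
    rw [PySem.Set.mem_ofList, PySem.Set.mem_ofList, hperm.mem_iff]
  rw [pv_key_lemma (PySem.List.sorted (l.map pvUname) (fun x => x) false).length _ le_rfl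
      (by simpa using PySem.List.sorted_pairwise (l.map pvUname) (fun x => x)), hsets]
  apply List.map_congr_left
  intro u _
  rw [PySem.Dict.getD_counter, Nat.cast_inj]
  exact (hperm.count_eq u).symm

-- the username stream A folds over is the sorted username list
theorem pv_t_eq (l : List (List (String × String))) :
    (PySem.List.sorted l (fun c => pvUname c) false).map pvUname =
      PySem.List.sorted (l.map pvUname) (fun x => x) false := by
  symm
  apply PySem.List.sorted_id_eq_of_perm_of_pairwise
  · exact (PySem.List.sorted_perm l (fun c => pvUname c) false).map pvUname
  · exact List.pairwise_map.mpr (PySem.List.sorted_pairwise l (fun c => pvUname c))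

-- A's machine agrees with pvSpec on a sorted key list that is all-"" or ""-free
theorem pv_main (t : List String) (hp : t.Pairwise (· ≤ ·))
    (h : (∀ x ∈ t, x ≠ "") ∨ (∀ x ∈ t, x = "")) :
    pvFin (t.foldl pvStep ([], "", 0, true)) = pvSpec t := by
  cases t with
  | nil => simp [pvFin, pvSpec_nil]
  | cons k rest =>
    rcases h with h | h
    · exact pv_start 0 k rest (h k (by simp)) hp
    · have hrep : (k :: rest) = List.replicate (k :: rest).length "" :=
        List.eq_replicate_of_mem h
      rw [hrep, pv_replicate_fold, pv_spec_replicate]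
      simp [pvFin]

-- a sorted key list splits into its "" block followed by its non-"" part
theorem pv_split (t : List String) (hp : t.Pairwise (· ≤ ·)) :
    t = List.replicate (t.count "") "" ++ t.filter (· ≠ "") := by
  induction t with
  | nil => simp
  | cons k r ih =>
    have hhead : ∀ x ∈ r, k ≤ x := (List.pairwise_cons.mp hp).1
    by_cases hk : k = ""
    · subst hk
      rw [List.count_cons_self, List.replicate_succ]
      simpa using ih (List.pairwise_cons.mp hp).2
    · have hnot : ∀ x ∈ k :: r, x ≠ "" := by
        intro x hx hx0
        rcases List.mem_cons.mp hx with h | h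
        · exact hk (h.symm.trans hx0)
        · exact hk (le_antisymm (hx0 ▸ hhead x h) (pv_empty_le k))
      rw [List.count_eq_zero.mpr (fun h => hnot "" h rfl),
        show List.filter (fun x => decide (x ≠ "")) (k :: r) = k :: r from
          List.filter_eq_self.mpr (fun x hx => by simpa using hnot x hx)]
      simp

-- ===== VERDICT (by name: the statement is the Claim_ definition above) =====
theorem count_researchers_spec : Claim_unchanged_count_researchers := by
  intro l _ _ hnD
  rw [pvB_eq_spec, pvA_eq_fold, pv_t_eq]
  have hpt : (PySem.List.sorted (l.map pvUname) (fun x => x) false).Pairwise (· ≤ ·) := by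
    simpa using PySem.List.sorted_pairwise (l.map pvUname) (fun x => x)
  apply pv_main _ hpt
  unfold D_count_researchers at hnD
  have hmem : ∀ x ∈ PySem.List.sorted (l.map pvUname) (fun x => x) false,
      ∃ c ∈ l, pvUname c = x := by
    intro x hx
    have hx' : x ∈ l.map pvUname := (PySem.List.sorted_perm _ _ _).mem_iff.mp hx
    simpa [eq_comm] using List.mem_map.mp hx'
  by_cases hex : ∃ c ∈ l, pvUname c = ""
  · right
    intro x hx
    obtain ⟨c, hc, hcu⟩ := hmem x hx
    by_contra hne
    exact hnD ⟨hex, ⟨c, hc, fun h0 => hne (hcu ▸ h0)⟩⟩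
  · left
    intro x hx hx0
    obtain ⟨c, hc, hcu⟩ := hmem x hx
    exact hex ⟨c, hc, hx0 ▸ hcu⟩

theorem pv_witness_map : pvDiffWitness_count_researchers.map pvUname = ["", "a"] := by
  decide

theorem pv_witness_sorted :
    PySem.List.sorted (["", "a"] : List String) (fun x => x) false = ["", "a"] :=
  PySem.List.sorted_eq_self_of_pairwise _ _
    (List.pairwise_cons.mpr ⟨fun b _ => pv_empty_le b, List.pairwise_singleton _ _⟩)

theorem count_researchers_changed : Claim_changed_count_researchers := by
  unfold Claim_changed_count_researchers
  refine ⟨by decide, by decide, by decide, ?_, ?_, by decide⟩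
  · rw [pvA_eq_fold, pv_t_eq, pv_witness_map, pv_witness_sorted]
    simp [pvStep, pvFin, pvDiffWitnessOut_count_researchers]
  · rw [pvB_eq_spec, pv_witness_map, pv_witness_sorted, pvSpec_cons]
    simp [pvSpec_cons, pvSpec_nil, pvDiffWitnessOut_count_researchers]

theorem count_researchers_tight : Claim_exact_count_researchers := by
  intro l _ _ hD
  rw [pvB_eq_spec, pvA_eq_fold, pv_t_eq]
  set t := PySem.List.sorted (l.map pvUname) (fun x => x) false with ht
  have hpt : t.Pairwise (· ≤ ·) := by
    simpa using PySem.List.sorted_pairwise (l.map pvUname) (fun x => x)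
  obtain ⟨⟨c1, hc1, h1⟩, ⟨c2, hc2, h2⟩⟩ := hD
  have hmem0 : "" ∈ t := by
    rw [ht, (PySem.List.sorted_perm _ _ _).mem_iff]
    exact List.mem_map.mpr ⟨c1, hc1, h1⟩
  have hmem2 : pvUname c2 ∈ t := by
    rw [ht, (PySem.List.sorted_perm _ _ _).mem_iff]
    exact List.mem_map.mpr ⟨c2, hc2, rfl⟩
  have hsplit := pv_split t hpt
  have hmpos : 0 < t.count "" := List.count_pos_iff.mpr hmem0
  have hrestmem : pvUname c2 ∈ t.filter (· ≠ "") :=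
    List.mem_filter.mpr ⟨hmem2, by simpa using h2⟩
  have hrp : (t.filter (· ≠ "")).Pairwise (· ≤ ·) := hpt.sublist List.filter_sublist
  have hrne : ∀ x ∈ t.filter (· ≠ ""), x ≠ "" := fun x hx => by
    simpa using (List.mem_filter.mp hx).2
  obtain ⟨k, rest', hrr⟩ := List.exists_cons_of_ne_nil (List.ne_nil_of_mem hrestmem)
  -- A's value: pvSpec of the non-"" part (the "" block is silently dropped)
  have hA : pvFin (List.foldl pvStep ([], "", 0, true) t) = pvSpec (t.filter (· ≠ "")) := by
    conv_lhs => rw [hsplit]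
    rw [List.foldl_append, pv_replicate_fold, hrr]
    rw [show (0 : Int) + (t.count "" : Nat) = ((t.count "" : Nat) : Int) by ring]
    exact pv_start _ k rest' (hrne k (by rw [hrr]; exact List.mem_cons_self ..))
      (hrr ▸ hrp)
  -- B's value: the "" group's count followed by A's list
  have hB : pvSpec t = ((t.count "" : Nat) : Int) :: pvSpec (t.filter (· ≠ "")) := by
    conv_lhs => rw [hsplit]
    obtain ⟨m', hm'⟩ := Nat.exists_eq_succ_of_ne_zero (Nat.pos_iff_ne_zero.mp hmpos)
    rw [hm', List.replicate_succ, List.cons_append, pvSpec_cons]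
    congr 1
    · rw [List.count_append, List.count_replicate,
        List.count_eq_zero.mpr (fun h => hrne "" h rfl)]
      simp
      ring
    · congr 1
      rw [List.filter_append, List.filter_replicate,
        show List.filter (fun x => decide (x ≠ "")) (t.filter (· ≠ "")) = t.filter (· ≠ "") from
          List.filter_eq_self.mpr (fun x hx => by simpa using hrne x hx)]
      simp
  rw [hA, hB]
  intro hcontra
  have hlen := congrArg List.length hcontra
  simp at hlen
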